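-- pv_equiv track=rewrite | github.com/asRot0/Codes | codeforces/prb 1800-1999/1851A.py | find_possible_steps
-- ===== SOURCE A (Python) =====
-- def find_possible_steps(hi, m, k, H):
--     possible_steps = set()
--     for j in range(m):
--         step_height = j * k
--         if (H + step_height - hi) % k == 0:
--             possible_step = 1 + (H + step_height - hi) // k
--             if 1 <= possible_step <= m and possible_step != j + 1:
--                 possible_steps.add(possible_step)
--     return possible_steps
-- ===== SOURCE B (Python) =====
-- def find_possible_steps(hi, m, k, H):
--     if m <= 0:
--         return set()
--     diff = H - hi
--     if diff % k != 0:
--         return set()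
--     base = 1 + diff // k
--     if base == 1:
--         return set()
--     return set(range(max(1, base), min(m, base + m - 1) + 1))
-- ===== Notes on version B (the rewrite author's own statement) =====
-- stated objective: faster
-- what changed: Replaces A's per-j loop over range(m) (testing divisibility and bounds for every j) by a single divisibility test and a closed-form construction of the contiguous range of valid steps.
import Mathlib
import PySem

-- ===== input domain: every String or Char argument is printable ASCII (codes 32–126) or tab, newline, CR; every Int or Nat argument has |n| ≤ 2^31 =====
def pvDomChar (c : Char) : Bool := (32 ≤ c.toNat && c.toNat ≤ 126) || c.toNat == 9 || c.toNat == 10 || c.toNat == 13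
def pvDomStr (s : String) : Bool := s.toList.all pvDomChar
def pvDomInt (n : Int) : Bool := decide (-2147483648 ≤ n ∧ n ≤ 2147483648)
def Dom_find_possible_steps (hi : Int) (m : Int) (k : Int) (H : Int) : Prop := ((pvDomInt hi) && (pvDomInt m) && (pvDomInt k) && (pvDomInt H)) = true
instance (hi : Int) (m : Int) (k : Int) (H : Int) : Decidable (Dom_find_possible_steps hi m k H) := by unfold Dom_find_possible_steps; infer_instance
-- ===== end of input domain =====

-- B replaces A's per-step loop by a direct closed-form construction of the
-- contiguous range of valid steps (objective: faster — the divisibility test is done once).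

-- ===== PORT A =====
def find_possible_steps (hi : Int) (m : Int) (k : Int) (H : Int) : List Int :=
  (PySem.List.pyRange 0 m 1).foldl
    (fun possible_steps j =>
      let step_height := j * k
      if PySem.Int.mod (H + step_height - hi) k = 0 then
        let possible_step := 1 + PySem.Int.floordiv (H + step_height - hi) k
        if 1 ≤ possible_step ∧ possible_step ≤ m ∧ possible_step ≠ j + 1 then
          PySem.Set.add possible_steps possible_step
        else possible_steps
      else possible_steps)
    PySem.Set.empty

-- ===== PORT B =====
def find_possible_steps_alt (hi : Int) (m : Int) (k : Int) (H : Int) : List Int :=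
  if m ≤ 0 then PySem.Set.empty
  else
    let diff := H - hi
    if PySem.Int.mod diff k ≠ 0 then PySem.Set.empty
    else
      let base := 1 + PySem.Int.floordiv diff k
      if base = 1 then PySem.Set.empty
      else PySem.Set.ofList (PySem.List.pyRange (max 1 base) (min m (base + m - 1) + 1) 1)

-- ===== PRECONDITION & SPEC =====
-- Pre_ excludes exactly the inputs where Python A raises ZeroDivisionError (k = 0 with a nonempty loop).
def Pre_find_possible_steps (hi : Int) (m : Int) (k : Int) (H : Int) : Prop := m ≤ 0 ∨ k ≠ 0
instance (hi : Int) (m : Int) (k : Int) (H : Int) : Decidable (Pre_find_possible_steps hi m k H) := by unfold Pre_find_possible_steps; infer_instance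
def pvWitness_find_possible_steps : Int × Int × Int × Int := (0, 3, 2, 4)

def Spec_find_possible_steps (hi : Int) (m : Int) (k : Int) (H : Int) (out : List Int) : Prop := out = find_possible_steps_alt hi m k H
instance (hi : Int) (m : Int) (k : Int) (H : Int) (out : List Int) : Decidable (Spec_find_possible_steps hi m k H out) := by unfold Spec_find_possible_steps; infer_instance

-- ===== CLAIM (what is proved, stated in full; the proofs are below) =====
def Claim_equal_find_possible_steps : Prop := ∀ (hi : Int) (m : Int) (k : Int) (H : Int), Dom_find_possible_steps hi m k H → Pre_find_possible_steps hi m k H → Spec_find_possible_steps hi m k H (find_possible_steps hi m k H)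

-- ===== LEMMAS AND PROOFS =====

-- Python's % and // are invariant / shift by multiples of the divisor.
theorem pvModShift (a j k : Int) (hk : k ≠ 0) :
    PySem.Int.mod (a + j * k) k = PySem.Int.mod a k := by
  rcases lt_or_gt_of_ne hk with h | h
  · have e1 := PySem.Int.mod_neg_neg (-(a + j * k)) (-k)
    have e2 := PySem.Int.mod_neg_neg (-a) (-k)
    simp only [neg_neg] at e1 e2
    rw [e1, e2, PySem.Int.mod_eq_emod_of_pos (by omega : (0:Int) < -k),
        PySem.Int.mod_eq_emod_of_pos (by omega : (0:Int) < -k),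
        show -(a + j * k) = -a + j * (-k) by ring, Int.add_mul_emod_self_right]
  · rw [PySem.Int.mod_eq_emod_of_pos h, PySem.Int.mod_eq_emod_of_pos h,
        Int.add_mul_emod_self_right]

theorem pvDivShift (a j k : Int) (hk : k ≠ 0) :
    PySem.Int.floordiv (a + j * k) k = PySem.Int.floordiv a k + j := by
  rcases lt_or_gt_of_ne hk with h | h
  · have e1 := PySem.Int.floordiv_neg_neg (-(a + j * k)) (-k)
    have e2 := PySem.Int.floordiv_neg_neg (-a) (-k)
    simp only [neg_neg] at e1 e2
    rw [e1, e2, PySem.Int.floordiv_eq_ediv_of_pos (by omega : (0:Int) < -k),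
        PySem.Int.floordiv_eq_ediv_of_pos (by omega : (0:Int) < -k),
        show -(a + j * k) = -a + j * (-k) by ring,
        Int.add_mul_ediv_right _ _ (by omega : (-k:Int) ≠ 0)]
  · rw [PySem.Int.floordiv_eq_ediv_of_pos h, PySem.Int.floordiv_eq_ediv_of_pos h,
        Int.add_mul_ediv_right _ _ hk]

-- the loop, with its body already simplified, builds a contiguous range
theorem pvLoopInv (base m : Int) (n : Nat) :
    (PySem.List.pyRange 0 (n : Int) 1).foldl
      (fun ps j => if 1 ≤ base + j ∧ base + j ≤ m then PySem.Set.add ps (base + j) else ps)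
      ([] : List Int)
    = PySem.List.pyRange (max 1 base) (min (m + 1) (base + n)) 1 := by
  induction n with
  | zero =>
    rw [PySem.List.pyRange_one_eq_nil (by norm_num), PySem.List.pyRange_one_eq_nil (by omega)]
    rfl
  | succ n ih =>
    have hcast : ((n + 1 : Nat) : Int) = (n : Int) + 1 := by push_cast; ring
    rw [hcast, PySem.List.pyRange_one_succ_right (by positivity), List.foldl_append, ih]
    simp only [List.foldl_cons, List.foldl_nil]
    by_cases hc : 1 ≤ base + (n : Int) ∧ base + (n : Int) ≤ m
    · rw [if_pos hc]
      have hnm : base + (n : Int) ∉ PySem.List.pyRange (max 1 base) (min (m + 1) (base + (n : Int))) 1 := by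
        rw [PySem.List.mem_pyRange_one]; omega
      rw [PySem.Set.add_of_not_mem hnm]
      have h1 : min (m + 1) (base + (n : Int)) = base + (n : Int) := by omega
      have h2 : min (m + 1) (base + ((n : Int) + 1)) = base + (n : Int) + 1 := by omega
      rw [h1, h2, PySem.List.pyRange_one_succ_right (by omega)]
    · rw [if_neg hc]
      rcases (not_and_or.mp hc) with h | h
      · rw [PySem.List.pyRange_one_eq_nil (by omega), PySem.List.pyRange_one_eq_nil (by omega)]
      · congr 1
        omega

-- ===== VERDICT (by name: the statement is the Claim_ definition above) =====
theorem find_possible_steps_spec : Claim_equal_find_possible_steps := by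
  intro hi m k H _ hpre
  unfold Spec_find_possible_steps find_possible_steps find_possible_steps_alt
  by_cases hm : m ≤ 0
  · rw [if_pos hm, PySem.List.pyRange_one_eq_nil hm]; rfl
  · rw [if_neg hm]
    have hk : k ≠ 0 := hpre.resolve_left (by omega)
    have hm0 : 0 < m := by omega
    have hq := fun j => pvDivShift (H - hi) j k hk
    have hr := fun j => pvModShift (H - hi) j k hk
    by_cases hmod : PySem.Int.mod (H - hi) k = 0
    · by_cases hbase : (1 : Int) + PySem.Int.floordiv (H - hi) k = 1
      · -- base = 1 : every candidate equals j + 1, nothing is added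
        rw [if_neg (by simpa using hmod), if_pos hbase,
            PySem.List.foldl_congr_mem _ _ (fun acc _ => acc) _ (by
              intro acc j hj
              dsimp only
              rw [show H + j * k - hi = (H - hi) + j * k by ring, hr j, hq j,
                  if_pos hmod, if_neg (by omega)]),
            PySem.List.foldl_ignore]
      · -- base ≠ 1 : the loop builds the contiguous range
        rw [if_neg (by simpa using hmod), if_neg hbase,
            PySem.List.foldl_congr_mem _ _
              (fun ps j => if 1 ≤ (1 + PySem.Int.floordiv (H - hi) k) + j ∧
                             (1 + PySem.Int.floordiv (H - hi) k) + j ≤ m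
                           then PySem.Set.add ps ((1 + PySem.Int.floordiv (H - hi) k) + j)
                           else ps) _ (by
              intro acc j hj
              dsimp only
              rw [show H + j * k - hi = (H - hi) + j * k by ring, hr j, hq j, if_pos hmod,
                  show (1 : Int) + (PySem.Int.floordiv (H - hi) k + j)
                     = (1 + PySem.Int.floordiv (H - hi) k) + j by ring]
              by_cases hc : 1 ≤ (1 + PySem.Int.floordiv (H - hi) k) + j ∧
                  (1 + PySem.Int.floordiv (H - hi) k) + j ≤ m
              · rw [if_pos (by omega), if_pos hc]
              · rw [if_neg (by omega), if_neg hc]),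
            show m = ((m.toNat : Nat) : Int) by omega,
            show (PySem.Set.empty : List Int) = ([] : List Int) from rfl,
            pvLoopInv (1 + PySem.Int.floordiv (H - hi) k) ((m.toNat : Nat) : Int) m.toNat,
            PySem.Set.ofList_eq_self_of_nodup _ (PySem.List.nodup_pyRange_one _ _)]
        congr 1
        omega
    · -- diff % k ≠ 0 : nothing is ever added
      rw [if_pos (by simpa using hmod),
          PySem.List.foldl_congr_mem _ _ (fun acc _ => acc) _ (by
            intro acc j hj
            simp only
            rw [show H + j * k - hi = (H - hi) + j * k by ring, hr j, if_neg hmod]),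
          PySem.List.foldl_ignore]
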